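-- pv_equiv track=rewrite | github.com/Mart1nRH716/codigos-Hackerank | reina.py | contar_diag_izq_abajo
-- ===== SOURCE A (Python) =====
-- def contar_diag_izq_abajo(n, r_q, c_q,  obstaculo_colA, counter):
--     if len(obstaculo_colA) == 0:
--         if r_q <=  1 or c_q <= 1:
--             return counter
--         else:
--             return contar_diag_izq_abajo(n, r_q-1, c_q -1, obstaculo_colA, counter + 1)
--     else:
--         #Esto se hace para que no avance al otro lado
--         if r_q <= 1 or c_q <= 1 or (obstaculo_colA[0] == r_q - 1 and obstaculo_colA[1] == c_q - 1):
--             return counter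
--         else:
--             return contar_diag_izq_abajo(n, r_q-1, c_q - 1, obstaculo_colA, counter + 1)
-- ===== SOURCE B (Python) =====
-- def contar_diag_izq_abajo(n, r_q, c_q, obstaculo_colA, counter):
--     # Closed form: number of down-left diagonal steps until boundary,
--     # clipped just before the obstacle if it sits on that diagonal path.
--     steps = min(r_q - 1, c_q - 1)
--     if steps < 0:
--         steps = 0
--     if len(obstaculo_colA) >= 2:
--         d = r_q - obstaculo_colA[0]
--         if d == c_q - obstaculo_colA[1] and 1 <= d <= steps:
--             steps = d - 1
--     return counter + steps
-- ===== Notes on version B (the rewrite author's own statement) =====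
-- stated objective: faster
-- what changed: Replaced A's step-by-step recursion down the diagonal with an O(1) closed form: counter + min(steps-to-boundary, steps-to-obstacle-on-the-diagonal).
-- outside the precondition, e.g. on contar_diag_izq_abajo(0, 9961, 9961, [], 0): A returns 9960, B returns 9960
import Mathlib
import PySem

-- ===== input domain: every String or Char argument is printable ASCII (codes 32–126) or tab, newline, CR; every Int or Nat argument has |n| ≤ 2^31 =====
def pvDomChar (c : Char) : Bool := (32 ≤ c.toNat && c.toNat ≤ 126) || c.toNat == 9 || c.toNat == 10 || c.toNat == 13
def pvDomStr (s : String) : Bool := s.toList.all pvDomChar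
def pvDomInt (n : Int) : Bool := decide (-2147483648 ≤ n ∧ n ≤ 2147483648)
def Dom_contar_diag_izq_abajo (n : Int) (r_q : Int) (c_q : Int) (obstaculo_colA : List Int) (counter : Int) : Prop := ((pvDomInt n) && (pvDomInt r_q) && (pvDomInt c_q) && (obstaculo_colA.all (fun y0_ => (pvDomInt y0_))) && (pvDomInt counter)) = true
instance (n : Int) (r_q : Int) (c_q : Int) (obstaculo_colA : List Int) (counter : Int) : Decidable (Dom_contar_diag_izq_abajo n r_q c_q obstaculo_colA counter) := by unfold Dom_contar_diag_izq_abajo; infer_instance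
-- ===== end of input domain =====

-- ===== PORT A =====
-- literal transliteration of A's recursion down the diagonal
def contar_diag_izq_abajo (n : Int) (r_q : Int) (c_q : Int) (obstaculo_colA : List Int) (counter : Int) : Int :=
  if obstaculo_colA.length = 0 then
    if r_q ≤ 1 ∨ c_q ≤ 1 then counter
    else contar_diag_izq_abajo n (r_q - 1) (c_q - 1) obstaculo_colA (counter + 1)
  else
    if h : r_q ≤ 1 ∨ c_q ≤ 1 ∨ (PySem.List.pyGet? obstaculo_colA 0 = some (r_q - 1) ∧ PySem.List.pyGet? obstaculo_colA 1 = some (c_q - 1)) then counter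
    else contar_diag_izq_abajo n (r_q - 1) (c_q - 1) obstaculo_colA (counter + 1)
termination_by r_q.toNat
decreasing_by
  · omega
  · simp only [not_or] at h; omega

-- ===== PORT B =====
-- closed form: counter + min(steps-to-boundary, steps-to-obstacle-on-the-diagonal)
def contar_diag_izq_abajo_alt (n : Int) (r_q : Int) (c_q : Int) (obstaculo_colA : List Int) (counter : Int) : Int :=
  let steps := if min (r_q - 1) (c_q - 1) < 0 then 0 else min (r_q - 1) (c_q - 1)
  match obstaculo_colA with
  | o0 :: o1 :: _ =>
      let d := r_q - o0
      if d = c_q - o1 ∧ 1 ≤ d ∧ d ≤ steps then counter + (d - 1) else counter + steps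
  | _ => counter + steps

-- ===== PRECONDITION & SPEC =====
-- Pre_ excludes exactly the inputs on which A raises: (a) IndexError, on a length-1
-- obstacle list whose single entry equals r-1 at some step of the walk with r>1, c>1;
-- (b) RecursionError, when the number of recursive steps A actually takes — the
-- obstacle-aware closed form below, NOT just the board size — reaches 9950, a thin
-- safety margin below the runner's recursion limit of 10000 (the exact crash depth
-- depends on ambient interpreter stack state, so a narrow band where A may still
-- return is also excluded — see the claim's cite); boards of any size whose walk is
-- stopped early by the boundary or an obstacle are admitted.
def Pre_contar_diag_izq_abajo (n : Int) (r_q : Int) (c_q : Int) (obstaculo_colA : List Int) (counter : Int) : Prop :=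
  ¬ (obstaculo_colA.length = 1 ∧ 1 < r_q ∧ 1 < c_q ∧
     r_q - min (r_q - 1) (c_q - 1) ≤ obstaculo_colA.headD 0 ∧ obstaculo_colA.headD 0 ≤ r_q - 1) ∧
  (if 2 ≤ obstaculo_colA.length ∧
      r_q - obstaculo_colA.headD 0 = c_q - (obstaculo_colA.drop 1).headD 0 ∧
      1 ≤ r_q - obstaculo_colA.headD 0 ∧
      r_q - obstaculo_colA.headD 0 ≤ max (min (r_q - 1) (c_q - 1)) 0
   then r_q - obstaculo_colA.headD 0 - 1
   else max (min (r_q - 1) (c_q - 1)) 0) < 9950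
instance (n : Int) (r_q : Int) (c_q : Int) (obstaculo_colA : List Int) (counter : Int) : Decidable (Pre_contar_diag_izq_abajo n r_q c_q obstaculo_colA counter) := by unfold Pre_contar_diag_izq_abajo; infer_instance
def pvWitness_contar_diag_izq_abajo : Int × Int × Int × List Int × Int := (0, 4, 5, [2, 3], 0)

def Spec_contar_diag_izq_abajo (n : Int) (r_q : Int) (c_q : Int) (obstaculo_colA : List Int) (counter : Int) (out : Int) : Prop := out = contar_diag_izq_abajo_alt n r_q c_q obstaculo_colA counter
instance (n : Int) (r_q : Int) (c_q : Int) (obstaculo_colA : List Int) (counter : Int) (out : Int) : Decidable (Spec_contar_diag_izq_abajo n r_q c_q obstaculo_colA counter out) := by unfold Spec_contar_diag_izq_abajo; infer_instance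

-- ===== CLAIM (what is proved, stated in full; the proofs are below) =====
def Claim_equal_contar_diag_izq_abajo : Prop := ∀ (n : Int) (r_q : Int) (c_q : Int) (obstaculo_colA : List Int) (counter : Int), Dom_contar_diag_izq_abajo n r_q c_q obstaculo_colA counter → Pre_contar_diag_izq_abajo n r_q c_q obstaculo_colA counter → Spec_contar_diag_izq_abajo n r_q c_q obstaculo_colA counter (contar_diag_izq_abajo n r_q c_q obstaculo_colA counter)
-- ===== LEMMAS AND PROOFS =====
lemma pyGet1_singleton (o0 : Int) : PySem.List.pyGet? [o0] 1 = none := by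
  rw [PySem.List.pyGet?_eq_none_iff]
  simp [PySem.Raise.InRange]

lemma contar_eq_alt (n : Int) (r_q : Int) (c_q : Int) (obs : List Int) (counter : Int) :
    contar_diag_izq_abajo n r_q c_q obs counter = contar_diag_izq_abajo_alt n r_q c_q obs counter := by
  induction r_q, c_q, counter using contar_diag_izq_abajo.induct obs with
  | case1 r c counter hnil hbase =>
    have hobs : obs = [] := List.eq_nil_of_length_eq_zero hnil
    subst hobs
    rw [contar_diag_izq_abajo]
    simp only [List.length_nil, if_pos rfl, if_pos hbase, contar_diag_izq_abajo_alt]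
    split_ifs <;> omega
  | case2 r c counter hnil hbase ih =>
    have hobs : obs = [] := List.eq_nil_of_length_eq_zero hnil
    subst hobs
    rw [contar_diag_izq_abajo]
    simp only [List.length_nil, if_pos rfl, if_neg hbase]
    rw [ih]
    simp only [contar_diag_izq_abajo_alt, not_or] at *
    split_ifs <;> omega
  | case3 r c counter hnil hcond =>
    rw [contar_diag_izq_abajo]
    rw [if_neg hnil, dif_pos hcond]
    match obs, hnil with
    | o0 :: o1 :: t, _ =>
      simp only [PySem.List.pyGet?_zero_cons] at hcond
      have h1 : PySem.List.pyGet? (o0 :: o1 :: t) 1 = some o1 := by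
        simpa using PySem.List.pyGet?_cons_succ o0 (o1 :: t) 0
      rw [h1] at hcond
      simp only [Option.some_inj] at hcond
      simp only [contar_diag_izq_abajo_alt]
      rcases hcond with h | h | ⟨h2, h3⟩ <;> [skip; skip; subst h2 h3] <;> split_ifs <;> omega
    | [o0], _ =>
      simp only [contar_diag_izq_abajo_alt]
      rcases hcond with h | h | ⟨h2, h3⟩
      · split_ifs <;> omega
      · split_ifs <;> omega
      · rw [pyGet1_singleton o0] at h3
        exact absurd h3 (by simp)
  | case4 r c counter hnil hcond ih =>
    rw [contar_diag_izq_abajo]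
    rw [if_neg hnil, dif_neg hcond]
    rw [ih]
    simp only [not_or] at hcond
    obtain ⟨hr, hc, hmatch⟩ := hcond
    match obs, hnil with
    | o0 :: o1 :: t, _ =>
      simp only [PySem.List.pyGet?_zero_cons] at hmatch
      have h1 : PySem.List.pyGet? (o0 :: o1 :: t) 1 = some o1 := by
        simpa using PySem.List.pyGet?_cons_succ o0 (o1 :: t) 0
      rw [h1] at hmatch
      simp only [Option.some_inj, not_and] at hmatch
      simp only [contar_diag_izq_abajo_alt]
      by_cases he : o0 = r - 1 ∧ o1 = c - 1
      · exact absurd he.2 (hmatch he.1)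
      · rw [not_and_or] at he
        split_ifs <;> omega
    | [o0], _ =>
      simp only [contar_diag_izq_abajo_alt]
      split_ifs <;> omega

-- ===== VERDICT (by name: the statement is the Claim_ definition above) =====
theorem contar_diag_izq_abajo_spec : Claim_equal_contar_diag_izq_abajo := by
  intro n r c obs counter _ _
  exact contar_eq_alt n r c obs counter
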